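-- pv_equiv track=rewrite | github.com/Raffaele90/Social-Network | Classic_Search/Best_Match/Best_match_optimization.py | insert_sort_list
-- ===== SOURCE A (Python) =====
-- def insert_sort_list (lista,doc,freq):
--     l = list()
--     l.append(doc)
--     l.append(freq)
--     if (len(lista) == 0):
--
--         lista.append(l)
--         return lista
--
--     for i in range(len(lista)):
--         f = (lista[i])[1]
--         if (freq > f):
--
--             lista.insert(i,l)
--             return lista
--
--     lista.append(l)
--     return lista
-- ===== SOURCE B (Python) =====
-- def insert_sort_list(lista, doc, freq):
--     item = [doc, freq]
--     out = []
--     placed = False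
--     for e in lista:
--         if not placed and freq > e[1]:
--             out.append(item)
--             placed = True
--         out.append(e)
--     if not placed:
--         out.append(item)
--     lista[:] = out
--     return lista
-- ===== Notes on version B (the rewrite author's own statement) =====
-- stated objective: alternative
-- what changed: B builds the result list in a single forward fold with a 'placed' flag and splices it back with lista[:] = out, instead of A's index loop over range(len) with an early-return list.insert and a separate empty-list branch.
import Mathlib
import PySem

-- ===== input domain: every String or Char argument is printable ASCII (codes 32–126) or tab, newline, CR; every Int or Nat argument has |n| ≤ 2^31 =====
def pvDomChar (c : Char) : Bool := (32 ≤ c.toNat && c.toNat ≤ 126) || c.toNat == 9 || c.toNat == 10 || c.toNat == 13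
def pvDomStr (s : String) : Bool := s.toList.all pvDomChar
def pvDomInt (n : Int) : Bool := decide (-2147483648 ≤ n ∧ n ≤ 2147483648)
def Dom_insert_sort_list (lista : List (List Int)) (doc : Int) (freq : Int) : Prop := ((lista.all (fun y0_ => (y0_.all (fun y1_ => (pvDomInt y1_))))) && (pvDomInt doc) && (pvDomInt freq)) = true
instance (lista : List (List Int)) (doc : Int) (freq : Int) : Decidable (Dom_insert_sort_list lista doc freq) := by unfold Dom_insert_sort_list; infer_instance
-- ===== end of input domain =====

-- B replaces A's index loop + early-return list.insert by one forward fold building a fresh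
-- list with a 'placed' flag (same cost, different decomposition); both mutate lista in place
-- the same way, and the equivalence proved here is about the return value.

-- ===== PORT A =====
-- the for-i-in-range(len) loop of A with its early return; lista[i][1] is exact under Pre_
def aLoop (lista : List (List Int)) (freq : Int) (l : List Int) (i : Nat) : List (List Int) :=
  if h : i < lista.length then
    let f := PySem.List.pyGetD lista[i] 1 0
    if f < freq then PySem.List.insert lista (i : Int) l
    else aLoop lista freq l (i + 1)
  else lista ++ [l]
termination_by lista.length - i

def insert_sort_list (lista : List (List Int)) (doc : Int) (freq : Int) : List (List Int) :=
  let l : List Int := [doc, freq]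
  if lista.length = 0 then lista ++ [l]
  else aLoop lista freq l 0

-- ===== PORT B =====
-- one step of B's for-loop: state is (out, placed); e[1] is exact under Pre_
def bStep (freq : Int) (item : List Int) (acc : List (List Int) × Bool) (e : List Int) :
    List (List Int) × Bool :=
  let acc := if acc.2 = false ∧ PySem.List.pyGetD e 1 0 < freq then (acc.1 ++ [item], true) else acc
  (acc.1 ++ [e], acc.2)

def insert_sort_list_alt (lista : List (List Int)) (doc : Int) (freq : Int) : List (List Int) :=
  let item : List Int := [doc, freq]
  let r := lista.foldl (bStep freq item) ([], false)
  if r.2 = false then r.1 ++ [item] else r.1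

-- ===== PRECONDITION & SPEC =====
-- Pre_ is exactly where the Python A returns normally: scanning stops at the first index whose
-- frequency is below freq, and every element inspected up to (and at) that point must have at
-- least two entries, else Python's e[1] raises IndexError (B raises on exactly the same inputs).
def Pre_insert_sort_list (lista : List (List Int)) (doc : Int) (freq : Int) : Prop :=
  ∃ i ∈ List.range (lista.length + 1),
    (∀ j ∈ List.range i, 2 ≤ (lista.getD j []).length ∧
        freq ≤ PySem.List.pyGetD (lista.getD j []) 1 0) ∧
    (i = lista.length ∨ (2 ≤ (lista.getD i []).length ∧
        PySem.List.pyGetD (lista.getD i []) 1 0 < freq))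
instance (lista : List (List Int)) (doc : Int) (freq : Int) : Decidable (Pre_insert_sort_list lista doc freq) := by unfold Pre_insert_sort_list; infer_instance

def pvWitness_insert_sort_list : List (List Int) × Int × Int := ([[1, 5], [2, 3]], 7, 4)

def Spec_insert_sort_list (lista : List (List Int)) (doc : Int) (freq : Int) (out : List (List Int)) : Prop := out = insert_sort_list_alt lista doc freq
instance (lista : List (List Int)) (doc : Int) (freq : Int) (out : List (List Int)) : Decidable (Spec_insert_sort_list lista doc freq out) := by unfold Spec_insert_sort_list; infer_instance

-- ===== CLAIM (what is proved, stated in full; the proofs are below) =====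
def Claim_equal_insert_sort_list : Prop := ∀ (lista : List (List Int)) (doc : Int) (freq : Int), Dom_insert_sort_list lista doc freq → Pre_insert_sort_list lista doc freq → Spec_insert_sort_list lista doc freq (insert_sort_list lista doc freq)

-- ===== LEMMAS AND PROOFS =====

-- the common mathematical content: insert before the first element whose key is < freq
def ins (freq : Int) (l : List Int) : List (List Int) → List (List Int)
  | [] => [l]
  | e :: rest =>
      if PySem.List.pyGetD e 1 0 < freq then l :: e :: rest else e :: ins freq l rest

theorem aLoop_eq_ins (lista : List (List Int)) (freq : Int) (l : List Int) :
    ∀ i, i ≤ lista.length →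
      aLoop lista freq l i = lista.take i ++ ins freq l (lista.drop i) := by
  intro i
  induction hn : lista.length - i using Nat.strong_induction_on generalizing i with
  | _ n IH =>
    intro hle
    unfold aLoop
    by_cases h : i < lista.length
    · simp only [h, dif_pos]
      have hdrop : lista.drop i = lista[i] :: lista.drop (i + 1) :=
        (List.getElem_cons_drop h).symm
      by_cases hq : PySem.List.pyGetD lista[i] 1 0 < freq
      · simp only [hq, if_pos]
        rw [PySem.List.insert_natCast lista i l (le_of_lt h), hdrop, ins, if_pos hq]
      · simp only [hq, if_neg, not_false_iff]
        rw [IH (lista.length - (i + 1)) (by omega) (i + 1) rfl (by omega)]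
        rw [hdrop, ins, if_neg hq]
        have htake : lista.take (i + 1) = lista.take i ++ [lista[i]] :=
          List.take_succ_eq_append_getElem h
        rw [htake, List.append_assoc, List.singleton_append]
    · have hi : i = lista.length := by omega
      simp only [h, dif_neg, not_false_iff]
      subst hi
      simp [ins]

theorem bStep_placed (freq : Int) (item : List Int) (xs : List (List Int)) (o : List (List Int)) :
    xs.foldl (bStep freq item) (o, true) = (o ++ xs, true) := by
  induction xs generalizing o with
  | nil => simp
  | cons e xs IH =>
      simp only [List.foldl_cons, bStep]
      simpa using IH (o ++ [e])

theorem bFold_eq_ins (freq : Int) (item : List Int) (xs : List (List Int)) :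
    ∀ o : List (List Int),
      (let r := xs.foldl (bStep freq item) (o, false)
       if r.2 = false then r.1 ++ [item] else r.1) = o ++ ins freq item xs := by
  induction xs with
  | nil => intro o; simp [ins]
  | cons e xs IH =>
      intro o
      by_cases hq : PySem.List.pyGetD e 1 0 < freq
      · have hstep : bStep freq item (o, false) e = ((o ++ [item]) ++ [e], true) := by
          simp [bStep, hq]
        simp only [List.foldl_cons]
        rw [hstep, bStep_placed]
        simp [ins, hq]
      · have hstep : bStep freq item (o, false) e = (o ++ [e], false) := by
          simp [bStep, hq]
        simp only [List.foldl_cons]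
        rw [hstep, IH (o ++ [e])]
        simp [ins, hq]

-- ===== VERDICT (by name: the statement is the Claim_ definition above) =====
theorem insert_sort_list_spec : Claim_equal_insert_sort_list := by
  intro lista doc freq _ _
  unfold Spec_insert_sort_list insert_sort_list insert_sort_list_alt
  by_cases h0 : lista.length = 0
  · have : lista = [] := List.length_eq_zero_iff.mp h0
    subst this
    simp
  · simp only [h0, if_neg, not_false_iff]
    rw [aLoop_eq_ins lista freq [doc, freq] 0 (Nat.zero_le _)]
    have := bFold_eq_ins freq [doc, freq] lista []
    simp only at this
    rw [this]
    simp
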